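-- pv_equiv track=rewrite | github.com/junhg0211/boj | python/2072.py | get_lengths
-- ===== SOURCE A (Python) =====
-- SIZE = 19
--
-- def get_lengths(board: list, x: int, y: int) -> tuple[int]:
--     left_streak = True
--     down_left_streak = True
--     down_streak = True
--     down_right_streak = True
--     right_streak = True
--     up_right_streak = True
--     up_streak = True
--     up_left_streak = True
--
--     left, down_left, down, down_right, right, up_right, up, up_left = 0, 0, 0, 0, 0, 0, 0, 0
--
--     for i in range(1, 5):
--         left_available = x-i >= 0
--         right_available = x+i < SIZE
--         up_available = y-i >= 0
--         down_available = y+i < SIZE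
--
--         if up_available:
--             if left_available and up_left_streak and board[y-i][x-i] == board[y][x]:
--                 up_left += 1
--             else:
--                 up_left_streak = False
--
--             if up_streak and board[y-i][x] == board[y][x]:
--                 up += 1
--             else:
--                 up_streak = False
--
--             if right_available and up_right_streak and board[y-i][x+i] == board[y][x]:
--                 up_right += 1
--             else:
--                 up_right_streak = False
--
--         if left_available and left_streak and board[y][x-i] == board[y][x]:
--             left += 1
--         else:
--             left_streak = False
--
--         if right_available and right_streak and board[y][x+i] == board[y][x]:
--             right += 1
--         else:
--             right_streak = False
--
--         if down_available:
--             if left_available and down_left_streak and board[y+i][x-i] == board[y][x]: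
--                 down_left += 1
--             else:
--                 down_left_streak = False
--
--             if down_streak and board[y+i][x] == board[y][x]:
--                 down += 1
--             else:
--                 down_streak = False
--
--             if right_available and down_right_streak and board[y+i][x+i] == board[y][x]:
--                 down_right += 1
--             else:
--                 down_right_streak = False
--
--     return left + right, down_left + up_right, down + up, down_right + up_left
-- ===== SOURCE B (Python) =====
-- SIZE = 19
--
-- def get_lengths(board: list, x: int, y: int) -> tuple[int]:
--     target = board[y][x]
--
--     def walk(dx, dy):
--         allow = 4
--         if dx < 0:
--             allow = min(allow, x)
--         elif dx > 0:
--             allow = min(allow, SIZE - 1 - x)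
--         if dy < 0:
--             allow = min(allow, y)
--         elif dy > 0:
--             allow = min(allow, SIZE - 1 - y)
--         n = 0
--         for step in range(1, allow + 1):
--             if board[y + dy * step][x + dx * step] != target:
--                 break
--             n += 1
--         return n
--
--     return (walk(-1, 0) + walk(1, 0),
--             walk(-1, 1) + walk(1, -1),
--             walk(0, 1) + walk(0, -1),
--             walk(1, 1) + walk(-1, -1))
-- ===== Notes on version B (the rewrite author's own statement) =====
-- stated objective: simpler
-- what changed: Replaces A's single loop threading eight latching streak flags and eight counters with a per-direction walk that clamps its step count to the board edge in the direction of travel and counts matching cells until the first mismatch, then sums opposite directions.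
import Mathlib
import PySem

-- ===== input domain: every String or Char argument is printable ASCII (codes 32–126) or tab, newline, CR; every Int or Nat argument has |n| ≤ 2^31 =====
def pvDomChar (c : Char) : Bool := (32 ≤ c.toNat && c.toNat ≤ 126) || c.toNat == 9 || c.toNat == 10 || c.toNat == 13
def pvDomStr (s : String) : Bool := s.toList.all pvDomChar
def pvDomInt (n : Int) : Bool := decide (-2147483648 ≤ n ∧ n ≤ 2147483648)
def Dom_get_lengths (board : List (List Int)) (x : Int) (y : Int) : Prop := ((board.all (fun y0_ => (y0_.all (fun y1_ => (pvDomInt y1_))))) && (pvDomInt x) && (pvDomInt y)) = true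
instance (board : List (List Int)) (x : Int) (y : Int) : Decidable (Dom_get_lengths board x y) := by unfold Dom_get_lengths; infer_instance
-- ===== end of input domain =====

-- B replaces A's single loop carrying eight latching streak flags by a per-direction
-- (dx, dy) walk that breaks at the first boundary or mismatch (objective: idiomatic).

-- ===== PORT A =====
-- board[r][c]: total stand-in; .getD 0 marks IndexError, unreachable under Pre_
-- (shared by both ports — both Pythons index the board the same way).
def pvCell (board : List (List Int)) (r c : Int) : Int :=
  ((PySem.List.pyGet? board r).bind (fun row => PySem.List.pyGet? row c)).getD 0

-- the 8 streak flags and 8 counters A's loop maintains (one record field per Python local)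
structure GLSt where
  lS : Bool
  dlS : Bool
  dS : Bool
  drS : Bool
  rS : Bool
  urS : Bool
  uS : Bool
  ulS : Bool
  l : Int
  dl : Int
  d : Int
  dr : Int
  r : Int
  ur : Int
  u : Int
  ul : Int
deriving Repr, DecidableEq

-- A's loop body, one `if`-group per updater, applied in A's statement order
-- (each updater re-derives the availability test its Python `if` uses)
def updUL (board : List (List Int)) (x y t i : Int) (s : GLSt) : GLSt :=
  if decide (y - i ≥ 0) then
    (if decide (x - i ≥ 0) && s.ulS && decide (pvCell board (y-i) (x-i) = t) then {s with ul := s.ul + 1}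
     else {s with ulS := false}) else s

def updU (board : List (List Int)) (x y t i : Int) (s : GLSt) : GLSt :=
  if decide (y - i ≥ 0) then
    (if s.uS && decide (pvCell board (y-i) x = t) then {s with u := s.u + 1}
     else {s with uS := false}) else s

def updUR (board : List (List Int)) (x y t i : Int) (s : GLSt) : GLSt :=
  if decide (y - i ≥ 0) then
    (if decide (x + i < 19) && s.urS && decide (pvCell board (y-i) (x+i) = t) then {s with ur := s.ur + 1}
     else {s with urS := false}) else s

def updL (board : List (List Int)) (x y t i : Int) (s : GLSt) : GLSt :=
  if decide (x - i ≥ 0) && s.lS && decide (pvCell board y (x-i) = t) then {s with l := s.l + 1}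
  else {s with lS := false}

def updR (board : List (List Int)) (x y t i : Int) (s : GLSt) : GLSt :=
  if decide (x + i < 19) && s.rS && decide (pvCell board y (x+i) = t) then {s with r := s.r + 1}
  else {s with rS := false}

def updDL (board : List (List Int)) (x y t i : Int) (s : GLSt) : GLSt :=
  if decide (y + i < 19) then
    (if decide (x - i ≥ 0) && s.dlS && decide (pvCell board (y+i) (x-i) = t) then {s with dl := s.dl + 1}
     else {s with dlS := false}) else s

def updD (board : List (List Int)) (x y t i : Int) (s : GLSt) : GLSt :=
  if decide (y + i < 19) then
    (if s.dS && decide (pvCell board (y+i) x = t) then {s with d := s.d + 1}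
     else {s with dS := false}) else s

def updDR (board : List (List Int)) (x y t i : Int) (s : GLSt) : GLSt :=
  if decide (y + i < 19) then
    (if decide (x + i < 19) && s.drS && decide (pvCell board (y+i) (x+i) = t) then {s with dr := s.dr + 1}
     else {s with drS := false}) else s

-- one iteration of A's `for i in range(1, 5)` body: the eight updates in A's order
def glStep (board : List (List Int)) (x y t : Int) (s : GLSt) (i : Int) : GLSt :=
  updDR board x y t i (updD board x y t i (updDL board x y t i (updR board x y t i
    (updL board x y t i (updUR board x y t i (updU board x y t i (updUL board x y t i s)))))))

-- all flags True, all counters 0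
def glInit : GLSt := ⟨true, true, true, true, true, true, true, true, 0, 0, 0, 0, 0, 0, 0, 0⟩

def get_lengths (board : List (List Int)) (x : Int) (y : Int) : Int × Int × Int × Int :=
  let t := pvCell board y x
  let s := (PySem.List.pyRange 1 5 1).foldl (glStep board x y t) glInit
  (s.l + s.r, s.dl + s.ur, s.d + s.u, s.dr + s.ul)

-- ===== PORT B =====
-- Source B's walk(dx, dy): clamp the number of steps to what the board allows in the
-- direction of travel, then count matching cells until the first mismatch
def glAllow (x y dx dy : Int) : Int :=
  let a : Int := 4
  let a := if dx < 0 then min a x else if 0 < dx then min a (19 - 1 - x) else a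
  let a := if dy < 0 then min a y else if 0 < dy then min a (19 - 1 - y) else a
  a

def glWalk (board : List (List Int)) (x y t dx dy : Int) : List Int → Int
  | [] => 0
  | step :: rest =>
    if pvCell board (y + dy * step) (x + dx * step) = t then 1 + glWalk board x y t dx dy rest
    else 0

def get_lengths_alt (board : List (List Int)) (x : Int) (y : Int) : Int × Int × Int × Int :=
  let t := pvCell board y x
  let w := fun dx dy => glWalk board x y t dx dy (PySem.List.pyRange 1 (glAllow x y dx dy + 1) 1)
  (w (-1) 0 + w 1 0, w (-1) 1 + w 1 (-1), w 0 1 + w 0 (-1), w 1 1 + w (-1) (-1))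

-- ===== PRECONDITION & SPEC =====
-- board[r][c] is on the board under Python indexing (negative indices wrap)
def pvInRow (board : List (List Int)) (r c : Int) : Bool :=
  ((PySem.List.pyGet? board r).map (fun row => decide (PySem.Raise.InRange row.length c))).getD false

-- the scan towards (dx, dy) never leaves the board: wherever A's availability guards pass
-- and every earlier cell of the scan matched the probed cell, the next cell is on the board
def pvDirOK (board : List (List Int)) (x y dx dy : Int) : Bool :=
  ([1, 2, 3, 4] : List Int).all fun i =>
    !(decide (dx < 0 → i ≤ x) && decide (0 < dx → i ≤ 18 - x) &&
      decide (dy < 0 → i ≤ y) && decide (0 < dy → i ≤ 18 - y))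
    || !(([1, 2, 3, 4] : List Int).all fun j =>
          decide (j < i → pvCell board (y + dy * j) (x + dx * j) = pvCell board y x))
    || pvInRow board (y + dy * i) (x + dx * i)

-- exactly the inputs on which A returns normally: the probed cell and every cell an
-- availability-guarded scan reaches before its streak breaks lie on the board
-- (Python negative indices wrap); on every other input A raises IndexError.
def Pre_get_lengths (board : List (List Int)) (x : Int) (y : Int) : Prop :=
  (pvInRow board y x &&
    (([(-1, 0), (1, 0), (0, -1), (0, 1), (-1, -1), (1, -1), (-1, 1), (1, 1)] : List (Int × Int)).all
      fun d => pvDirOK board x y d.1 d.2)) = true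
instance (board : List (List Int)) (x : Int) (y : Int) : Decidable (Pre_get_lengths board x y) := by
  unfold Pre_get_lengths; infer_instance

def pvWitness_get_lengths : List (List Int) × Int × Int :=
  ([[1, 2], [3, 4]], 0, 0)

def Spec_get_lengths (board : List (List Int)) (x : Int) (y : Int) (out : Int × Int × Int × Int) : Prop := out = get_lengths_alt board x y
instance (board : List (List Int)) (x : Int) (y : Int) (out : Int × Int × Int × Int) : Decidable (Spec_get_lengths board x y out) := by unfold Spec_get_lengths; infer_instance

-- ===== CLAIM (what is proved, stated in full; the proofs are below) =====
def Claim_equal_get_lengths : Prop := ∀ (board : List (List Int)) (x : Int) (y : Int), Dom_get_lengths board x y → Pre_get_lengths board x y → Spec_get_lengths board x y (get_lengths board x y)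

-- ===== LEMMAS AND PROOFS =====

-- nested-if streak count: value of a broken-off 4-step walk with per-step go/no-go bits
def chain4 (o1 o2 o3 o4 : Bool) : Int :=
  if o1 then 1 + (if o2 then 1 + (if o3 then 1 + (if o4 then 1 else 0) else 0) else 0) else 0

-- A's three per-direction step shapes on a (flag, count) pair, as functions of decided bits
def stepL (a e : Bool) (p : Bool × Int) : Bool × Int :=
  if a && p.1 && e then (p.1, p.2 + 1) else (false, p.2)
def stepU (g e : Bool) (p : Bool × Int) : Bool × Int :=
  if g then (if p.1 && e then (p.1, p.2 + 1) else (false, p.2)) else p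
def stepD (g b e : Bool) (p : Bool × Int) : Bool × Int :=
  if g then (if b && p.1 && e then (p.1, p.2 + 1) else (false, p.2)) else p

lemma shape1 (a1 a2 a3 a4 e1 e2 e3 e4 : Bool) :
    (stepL a4 e4 (stepL a3 e3 (stepL a2 e2 (stepL a1 e1 (true, 0))))).2
      = chain4 (a1 && e1) (a2 && e2) (a3 && e3) (a4 && e4) := by
  revert a1 a2 a3 a4 e1 e2 e3 e4; decide

lemma shape2 (g1 g2 g3 g4 e1 e2 e3 e4 : Bool)
    (h21 : g2 = true → g1 = true) (h32 : g3 = true → g2 = true) (h43 : g4 = true → g3 = true) :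
    (stepU g4 e4 (stepU g3 e3 (stepU g2 e2 (stepU g1 e1 (true, 0))))).2
      = chain4 (g1 && e1) (g2 && e2) (g3 && e3) (g4 && e4) := by
  revert g1 g2 g3 g4 e1 e2 e3 e4 h21 h32 h43; decide

lemma shape3 (g1 g2 g3 g4 b1 b2 b3 b4 e1 e2 e3 e4 : Bool)
    (h21 : g2 = true → g1 = true) (h32 : g3 = true → g2 = true) (h43 : g4 = true → g3 = true) :
    (stepD g4 b4 e4 (stepD g3 b3 e3 (stepD g2 b2 e2 (stepD g1 b1 e1 (true, 0))))).2
      = chain4 (g1 && (b1 && e1)) (g2 && (b2 && e2)) (g3 && (b3 && e3)) (g4 && (b4 && e4)) := by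
  revert g1 g2 g3 g4 b1 b2 b3 b4 e1 e2 e3 e4 h21 h32 h43; decide

lemma hrange : PySem.List.pyRange 1 5 1 = [1, 2, 3, 4] := by decide

lemma and_merge (P Q R : Prop) [Decidable P] [Decidable Q] [Decidable R]
    (h : R ↔ P ∧ Q) (e : Bool) : (decide P && (decide Q && e)) = (decide R && e) := by
  rw [show decide R = (decide P && decide Q) from by
    rw [decide_eq_decide.mpr h]; exact Bool.decide_and P Q, Bool.and_assoc]

lemma walkB_chain (board : List (List Int)) (x y t dx dy a : Int) (ha : a ≤ 4) :
    glWalk board x y t dx dy (PySem.List.pyRange 1 (a + 1) 1)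
      = chain4
        (decide (1 ≤ a) && decide (pvCell board (y + dy * 1) (x + dx * 1) = t))
        (decide (2 ≤ a) && decide (pvCell board (y + dy * 2) (x + dx * 2) = t))
        (decide (3 ≤ a) && decide (pvCell board (y + dy * 3) (x + dx * 3) = t))
        (decide (4 ≤ a) && decide (pvCell board (y + dy * 4) (x + dx * 4) = t)) := by
  by_cases h0 : a ≤ 0
  · rw [PySem.List.pyRange_one_eq_nil (by omega)]
    simp [glWalk, chain4, show ¬(1 ≤ a) by omega]
  · by_cases h1 : a ≤ 1
    · rw [show a = 1 by omega, show PySem.List.pyRange 1 (1 + 1) 1 = [1] from by decide]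
      norm_num [glWalk, chain4]
    · by_cases h2 : a ≤ 2
      · rw [show a = 2 by omega, show PySem.List.pyRange 1 (2 + 1) 1 = [1, 2] from by decide]
        norm_num [glWalk, chain4]
      · by_cases h3 : a ≤ 3
        · rw [show a = 3 by omega, show PySem.List.pyRange 1 (3 + 1) 1 = [1, 2, 3] from by decide]
          norm_num [glWalk, chain4]
        · rw [show a = 4 by omega, show PySem.List.pyRange 1 (4 + 1) 1 = [1, 2, 3, 4] from by decide]
          norm_num [glWalk, chain4]

@[simp] lemma updUL_lS (board : List (List Int)) (x y t i : Int) (s : GLSt) :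
    (updUL board x y t i s).lS = s.lS := by
  simp only [updUL]; split_ifs <;> rfl

@[simp] lemma updUL_dlS (board : List (List Int)) (x y t i : Int) (s : GLSt) :
    (updUL board x y t i s).dlS = s.dlS := by
  simp only [updUL]; split_ifs <;> rfl

@[simp] lemma updUL_dS (board : List (List Int)) (x y t i : Int) (s : GLSt) :
    (updUL board x y t i s).dS = s.dS := by
  simp only [updUL]; split_ifs <;> rfl

@[simp] lemma updUL_drS (board : List (List Int)) (x y t i : Int) (s : GLSt) :
    (updUL board x y t i s).drS = s.drS := by
  simp only [updUL]; split_ifs <;> rfl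

@[simp] lemma updUL_rS (board : List (List Int)) (x y t i : Int) (s : GLSt) :
    (updUL board x y t i s).rS = s.rS := by
  simp only [updUL]; split_ifs <;> rfl

@[simp] lemma updUL_urS (board : List (List Int)) (x y t i : Int) (s : GLSt) :
    (updUL board x y t i s).urS = s.urS := by
  simp only [updUL]; split_ifs <;> rfl

@[simp] lemma updUL_uS (board : List (List Int)) (x y t i : Int) (s : GLSt) :
    (updUL board x y t i s).uS = s.uS := by
  simp only [updUL]; split_ifs <;> rfl

@[simp] lemma updUL_l (board : List (List Int)) (x y t i : Int) (s : GLSt) :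
    (updUL board x y t i s).l = s.l := by
  simp only [updUL]; split_ifs <;> rfl

@[simp] lemma updUL_dl (board : List (List Int)) (x y t i : Int) (s : GLSt) :
    (updUL board x y t i s).dl = s.dl := by
  simp only [updUL]; split_ifs <;> rfl

@[simp] lemma updUL_d (board : List (List Int)) (x y t i : Int) (s : GLSt) :
    (updUL board x y t i s).d = s.d := by
  simp only [updUL]; split_ifs <;> rfl

@[simp] lemma updUL_dr (board : List (List Int)) (x y t i : Int) (s : GLSt) :
    (updUL board x y t i s).dr = s.dr := by
  simp only [updUL]; split_ifs <;> rfl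

@[simp] lemma updUL_r (board : List (List Int)) (x y t i : Int) (s : GLSt) :
    (updUL board x y t i s).r = s.r := by
  simp only [updUL]; split_ifs <;> rfl

@[simp] lemma updUL_ur (board : List (List Int)) (x y t i : Int) (s : GLSt) :
    (updUL board x y t i s).ur = s.ur := by
  simp only [updUL]; split_ifs <;> rfl

@[simp] lemma updUL_u (board : List (List Int)) (x y t i : Int) (s : GLSt) :
    (updUL board x y t i s).u = s.u := by
  simp only [updUL]; split_ifs <;> rfl

@[simp] lemma updU_lS (board : List (List Int)) (x y t i : Int) (s : GLSt) :
    (updU board x y t i s).lS = s.lS := by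
  simp only [updU]; split_ifs <;> rfl

@[simp] lemma updU_dlS (board : List (List Int)) (x y t i : Int) (s : GLSt) :
    (updU board x y t i s).dlS = s.dlS := by
  simp only [updU]; split_ifs <;> rfl

@[simp] lemma updU_dS (board : List (List Int)) (x y t i : Int) (s : GLSt) :
    (updU board x y t i s).dS = s.dS := by
  simp only [updU]; split_ifs <;> rfl

@[simp] lemma updU_drS (board : List (List Int)) (x y t i : Int) (s : GLSt) :
    (updU board x y t i s).drS = s.drS := by
  simp only [updU]; split_ifs <;> rfl

@[simp] lemma updU_rS (board : List (List Int)) (x y t i : Int) (s : GLSt) :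
    (updU board x y t i s).rS = s.rS := by
  simp only [updU]; split_ifs <;> rfl

@[simp] lemma updU_urS (board : List (List Int)) (x y t i : Int) (s : GLSt) :
    (updU board x y t i s).urS = s.urS := by
  simp only [updU]; split_ifs <;> rfl

@[simp] lemma updU_ulS (board : List (List Int)) (x y t i : Int) (s : GLSt) :
    (updU board x y t i s).ulS = s.ulS := by
  simp only [updU]; split_ifs <;> rfl

@[simp] lemma updU_l (board : List (List Int)) (x y t i : Int) (s : GLSt) :
    (updU board x y t i s).l = s.l := by
  simp only [updU]; split_ifs <;> rfl

@[simp] lemma updU_dl (board : List (List Int)) (x y t i : Int) (s : GLSt) :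
    (updU board x y t i s).dl = s.dl := by
  simp only [updU]; split_ifs <;> rfl

@[simp] lemma updU_d (board : List (List Int)) (x y t i : Int) (s : GLSt) :
    (updU board x y t i s).d = s.d := by
  simp only [updU]; split_ifs <;> rfl

@[simp] lemma updU_dr (board : List (List Int)) (x y t i : Int) (s : GLSt) :
    (updU board x y t i s).dr = s.dr := by
  simp only [updU]; split_ifs <;> rfl

@[simp] lemma updU_r (board : List (List Int)) (x y t i : Int) (s : GLSt) :
    (updU board x y t i s).r = s.r := by
  simp only [updU]; split_ifs <;> rfl

@[simp] lemma updU_ur (board : List (List Int)) (x y t i : Int) (s : GLSt) :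
    (updU board x y t i s).ur = s.ur := by
  simp only [updU]; split_ifs <;> rfl

@[simp] lemma updU_ul (board : List (List Int)) (x y t i : Int) (s : GLSt) :
    (updU board x y t i s).ul = s.ul := by
  simp only [updU]; split_ifs <;> rfl

@[simp] lemma updUR_lS (board : List (List Int)) (x y t i : Int) (s : GLSt) :
    (updUR board x y t i s).lS = s.lS := by
  simp only [updUR]; split_ifs <;> rfl

@[simp] lemma updUR_dlS (board : List (List Int)) (x y t i : Int) (s : GLSt) :
    (updUR board x y t i s).dlS = s.dlS := by
  simp only [updUR]; split_ifs <;> rfl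

@[simp] lemma updUR_dS (board : List (List Int)) (x y t i : Int) (s : GLSt) :
    (updUR board x y t i s).dS = s.dS := by
  simp only [updUR]; split_ifs <;> rfl

@[simp] lemma updUR_drS (board : List (List Int)) (x y t i : Int) (s : GLSt) :
    (updUR board x y t i s).drS = s.drS := by
  simp only [updUR]; split_ifs <;> rfl

@[simp] lemma updUR_rS (board : List (List Int)) (x y t i : Int) (s : GLSt) :
    (updUR board x y t i s).rS = s.rS := by
  simp only [updUR]; split_ifs <;> rfl

@[simp] lemma updUR_uS (board : List (List Int)) (x y t i : Int) (s : GLSt) :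
    (updUR board x y t i s).uS = s.uS := by
  simp only [updUR]; split_ifs <;> rfl

@[simp] lemma updUR_ulS (board : List (List Int)) (x y t i : Int) (s : GLSt) :
    (updUR board x y t i s).ulS = s.ulS := by
  simp only [updUR]; split_ifs <;> rfl

@[simp] lemma updUR_l (board : List (List Int)) (x y t i : Int) (s : GLSt) :
    (updUR board x y t i s).l = s.l := by
  simp only [updUR]; split_ifs <;> rfl

@[simp] lemma updUR_dl (board : List (List Int)) (x y t i : Int) (s : GLSt) :
    (updUR board x y t i s).dl = s.dl := by
  simp only [updUR]; split_ifs <;> rfl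

@[simp] lemma updUR_d (board : List (List Int)) (x y t i : Int) (s : GLSt) :
    (updUR board x y t i s).d = s.d := by
  simp only [updUR]; split_ifs <;> rfl

@[simp] lemma updUR_dr (board : List (List Int)) (x y t i : Int) (s : GLSt) :
    (updUR board x y t i s).dr = s.dr := by
  simp only [updUR]; split_ifs <;> rfl

@[simp] lemma updUR_r (board : List (List Int)) (x y t i : Int) (s : GLSt) :
    (updUR board x y t i s).r = s.r := by
  simp only [updUR]; split_ifs <;> rfl

@[simp] lemma updUR_u (board : List (List Int)) (x y t i : Int) (s : GLSt) :
    (updUR board x y t i s).u = s.u := by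
  simp only [updUR]; split_ifs <;> rfl

@[simp] lemma updUR_ul (board : List (List Int)) (x y t i : Int) (s : GLSt) :
    (updUR board x y t i s).ul = s.ul := by
  simp only [updUR]; split_ifs <;> rfl

@[simp] lemma updL_dlS (board : List (List Int)) (x y t i : Int) (s : GLSt) :
    (updL board x y t i s).dlS = s.dlS := by
  simp only [updL]; split_ifs <;> rfl

@[simp] lemma updL_dS (board : List (List Int)) (x y t i : Int) (s : GLSt) :
    (updL board x y t i s).dS = s.dS := by
  simp only [updL]; split_ifs <;> rfl

@[simp] lemma updL_drS (board : List (List Int)) (x y t i : Int) (s : GLSt) :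
    (updL board x y t i s).drS = s.drS := by
  simp only [updL]; split_ifs <;> rfl

@[simp] lemma updL_rS (board : List (List Int)) (x y t i : Int) (s : GLSt) :
    (updL board x y t i s).rS = s.rS := by
  simp only [updL]; split_ifs <;> rfl

@[simp] lemma updL_urS (board : List (List Int)) (x y t i : Int) (s : GLSt) :
    (updL board x y t i s).urS = s.urS := by
  simp only [updL]; split_ifs <;> rfl

@[simp] lemma updL_uS (board : List (List Int)) (x y t i : Int) (s : GLSt) :
    (updL board x y t i s).uS = s.uS := by
  simp only [updL]; split_ifs <;> rfl

@[simp] lemma updL_ulS (board : List (List Int)) (x y t i : Int) (s : GLSt) :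
    (updL board x y t i s).ulS = s.ulS := by
  simp only [updL]; split_ifs <;> rfl

@[simp] lemma updL_dl (board : List (List Int)) (x y t i : Int) (s : GLSt) :
    (updL board x y t i s).dl = s.dl := by
  simp only [updL]; split_ifs <;> rfl

@[simp] lemma updL_d (board : List (List Int)) (x y t i : Int) (s : GLSt) :
    (updL board x y t i s).d = s.d := by
  simp only [updL]; split_ifs <;> rfl

@[simp] lemma updL_dr (board : List (List Int)) (x y t i : Int) (s : GLSt) :
    (updL board x y t i s).dr = s.dr := by
  simp only [updL]; split_ifs <;> rfl

@[simp] lemma updL_r (board : List (List Int)) (x y t i : Int) (s : GLSt) :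
    (updL board x y t i s).r = s.r := by
  simp only [updL]; split_ifs <;> rfl

@[simp] lemma updL_ur (board : List (List Int)) (x y t i : Int) (s : GLSt) :
    (updL board x y t i s).ur = s.ur := by
  simp only [updL]; split_ifs <;> rfl

@[simp] lemma updL_u (board : List (List Int)) (x y t i : Int) (s : GLSt) :
    (updL board x y t i s).u = s.u := by
  simp only [updL]; split_ifs <;> rfl

@[simp] lemma updL_ul (board : List (List Int)) (x y t i : Int) (s : GLSt) :
    (updL board x y t i s).ul = s.ul := by
  simp only [updL]; split_ifs <;> rfl

@[simp] lemma updR_lS (board : List (List Int)) (x y t i : Int) (s : GLSt) :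
    (updR board x y t i s).lS = s.lS := by
  simp only [updR]; split_ifs <;> rfl

@[simp] lemma updR_dlS (board : List (List Int)) (x y t i : Int) (s : GLSt) :
    (updR board x y t i s).dlS = s.dlS := by
  simp only [updR]; split_ifs <;> rfl

@[simp] lemma updR_dS (board : List (List Int)) (x y t i : Int) (s : GLSt) :
    (updR board x y t i s).dS = s.dS := by
  simp only [updR]; split_ifs <;> rfl

@[simp] lemma updR_drS (board : List (List Int)) (x y t i : Int) (s : GLSt) :
    (updR board x y t i s).drS = s.drS := by
  simp only [updR]; split_ifs <;> rfl

@[simp] lemma updR_urS (board : List (List Int)) (x y t i : Int) (s : GLSt) :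
    (updR board x y t i s).urS = s.urS := by
  simp only [updR]; split_ifs <;> rfl

@[simp] lemma updR_uS (board : List (List Int)) (x y t i : Int) (s : GLSt) :
    (updR board x y t i s).uS = s.uS := by
  simp only [updR]; split_ifs <;> rfl

@[simp] lemma updR_ulS (board : List (List Int)) (x y t i : Int) (s : GLSt) :
    (updR board x y t i s).ulS = s.ulS := by
  simp only [updR]; split_ifs <;> rfl

@[simp] lemma updR_l (board : List (List Int)) (x y t i : Int) (s : GLSt) :
    (updR board x y t i s).l = s.l := by
  simp only [updR]; split_ifs <;> rfl

@[simp] lemma updR_dl (board : List (List Int)) (x y t i : Int) (s : GLSt) :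
    (updR board x y t i s).dl = s.dl := by
  simp only [updR]; split_ifs <;> rfl

@[simp] lemma updR_d (board : List (List Int)) (x y t i : Int) (s : GLSt) :
    (updR board x y t i s).d = s.d := by
  simp only [updR]; split_ifs <;> rfl

@[simp] lemma updR_dr (board : List (List Int)) (x y t i : Int) (s : GLSt) :
    (updR board x y t i s).dr = s.dr := by
  simp only [updR]; split_ifs <;> rfl

@[simp] lemma updR_ur (board : List (List Int)) (x y t i : Int) (s : GLSt) :
    (updR board x y t i s).ur = s.ur := by
  simp only [updR]; split_ifs <;> rfl

@[simp] lemma updR_u (board : List (List Int)) (x y t i : Int) (s : GLSt) :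
    (updR board x y t i s).u = s.u := by
  simp only [updR]; split_ifs <;> rfl

@[simp] lemma updR_ul (board : List (List Int)) (x y t i : Int) (s : GLSt) :
    (updR board x y t i s).ul = s.ul := by
  simp only [updR]; split_ifs <;> rfl

@[simp] lemma updDL_lS (board : List (List Int)) (x y t i : Int) (s : GLSt) :
    (updDL board x y t i s).lS = s.lS := by
  simp only [updDL]; split_ifs <;> rfl

@[simp] lemma updDL_dS (board : List (List Int)) (x y t i : Int) (s : GLSt) :
    (updDL board x y t i s).dS = s.dS := by
  simp only [updDL]; split_ifs <;> rfl

@[simp] lemma updDL_drS (board : List (List Int)) (x y t i : Int) (s : GLSt) :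
    (updDL board x y t i s).drS = s.drS := by
  simp only [updDL]; split_ifs <;> rfl

@[simp] lemma updDL_rS (board : List (List Int)) (x y t i : Int) (s : GLSt) :
    (updDL board x y t i s).rS = s.rS := by
  simp only [updDL]; split_ifs <;> rfl

@[simp] lemma updDL_urS (board : List (List Int)) (x y t i : Int) (s : GLSt) :
    (updDL board x y t i s).urS = s.urS := by
  simp only [updDL]; split_ifs <;> rfl

@[simp] lemma updDL_uS (board : List (List Int)) (x y t i : Int) (s : GLSt) :
    (updDL board x y t i s).uS = s.uS := by
  simp only [updDL]; split_ifs <;> rfl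

@[simp] lemma updDL_ulS (board : List (List Int)) (x y t i : Int) (s : GLSt) :
    (updDL board x y t i s).ulS = s.ulS := by
  simp only [updDL]; split_ifs <;> rfl

@[simp] lemma updDL_l (board : List (List Int)) (x y t i : Int) (s : GLSt) :
    (updDL board x y t i s).l = s.l := by
  simp only [updDL]; split_ifs <;> rfl

@[simp] lemma updDL_d (board : List (List Int)) (x y t i : Int) (s : GLSt) :
    (updDL board x y t i s).d = s.d := by
  simp only [updDL]; split_ifs <;> rfl

@[simp] lemma updDL_dr (board : List (List Int)) (x y t i : Int) (s : GLSt) :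
    (updDL board x y t i s).dr = s.dr := by
  simp only [updDL]; split_ifs <;> rfl

@[simp] lemma updDL_r (board : List (List Int)) (x y t i : Int) (s : GLSt) :
    (updDL board x y t i s).r = s.r := by
  simp only [updDL]; split_ifs <;> rfl

@[simp] lemma updDL_ur (board : List (List Int)) (x y t i : Int) (s : GLSt) :
    (updDL board x y t i s).ur = s.ur := by
  simp only [updDL]; split_ifs <;> rfl

@[simp] lemma updDL_u (board : List (List Int)) (x y t i : Int) (s : GLSt) :
    (updDL board x y t i s).u = s.u := by
  simp only [updDL]; split_ifs <;> rfl

@[simp] lemma updDL_ul (board : List (List Int)) (x y t i : Int) (s : GLSt) :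
    (updDL board x y t i s).ul = s.ul := by
  simp only [updDL]; split_ifs <;> rfl

@[simp] lemma updD_lS (board : List (List Int)) (x y t i : Int) (s : GLSt) :
    (updD board x y t i s).lS = s.lS := by
  simp only [updD]; split_ifs <;> rfl

@[simp] lemma updD_dlS (board : List (List Int)) (x y t i : Int) (s : GLSt) :
    (updD board x y t i s).dlS = s.dlS := by
  simp only [updD]; split_ifs <;> rfl

@[simp] lemma updD_drS (board : List (List Int)) (x y t i : Int) (s : GLSt) :
    (updD board x y t i s).drS = s.drS := by
  simp only [updD]; split_ifs <;> rfl

@[simp] lemma updD_rS (board : List (List Int)) (x y t i : Int) (s : GLSt) :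
    (updD board x y t i s).rS = s.rS := by
  simp only [updD]; split_ifs <;> rfl

@[simp] lemma updD_urS (board : List (List Int)) (x y t i : Int) (s : GLSt) :
    (updD board x y t i s).urS = s.urS := by
  simp only [updD]; split_ifs <;> rfl

@[simp] lemma updD_uS (board : List (List Int)) (x y t i : Int) (s : GLSt) :
    (updD board x y t i s).uS = s.uS := by
  simp only [updD]; split_ifs <;> rfl

@[simp] lemma updD_ulS (board : List (List Int)) (x y t i : Int) (s : GLSt) :
    (updD board x y t i s).ulS = s.ulS := by
  simp only [updD]; split_ifs <;> rfl

@[simp] lemma updD_l (board : List (List Int)) (x y t i : Int) (s : GLSt) :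
    (updD board x y t i s).l = s.l := by
  simp only [updD]; split_ifs <;> rfl

@[simp] lemma updD_dl (board : List (List Int)) (x y t i : Int) (s : GLSt) :
    (updD board x y t i s).dl = s.dl := by
  simp only [updD]; split_ifs <;> rfl

@[simp] lemma updD_dr (board : List (List Int)) (x y t i : Int) (s : GLSt) :
    (updD board x y t i s).dr = s.dr := by
  simp only [updD]; split_ifs <;> rfl

@[simp] lemma updD_r (board : List (List Int)) (x y t i : Int) (s : GLSt) :
    (updD board x y t i s).r = s.r := by
  simp only [updD]; split_ifs <;> rfl

@[simp] lemma updD_ur (board : List (List Int)) (x y t i : Int) (s : GLSt) :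
    (updD board x y t i s).ur = s.ur := by
  simp only [updD]; split_ifs <;> rfl

@[simp] lemma updD_u (board : List (List Int)) (x y t i : Int) (s : GLSt) :
    (updD board x y t i s).u = s.u := by
  simp only [updD]; split_ifs <;> rfl

@[simp] lemma updD_ul (board : List (List Int)) (x y t i : Int) (s : GLSt) :
    (updD board x y t i s).ul = s.ul := by
  simp only [updD]; split_ifs <;> rfl

@[simp] lemma updDR_lS (board : List (List Int)) (x y t i : Int) (s : GLSt) :
    (updDR board x y t i s).lS = s.lS := by
  simp only [updDR]; split_ifs <;> rfl

@[simp] lemma updDR_dlS (board : List (List Int)) (x y t i : Int) (s : GLSt) :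
    (updDR board x y t i s).dlS = s.dlS := by
  simp only [updDR]; split_ifs <;> rfl

@[simp] lemma updDR_dS (board : List (List Int)) (x y t i : Int) (s : GLSt) :
    (updDR board x y t i s).dS = s.dS := by
  simp only [updDR]; split_ifs <;> rfl

@[simp] lemma updDR_rS (board : List (List Int)) (x y t i : Int) (s : GLSt) :
    (updDR board x y t i s).rS = s.rS := by
  simp only [updDR]; split_ifs <;> rfl

@[simp] lemma updDR_urS (board : List (List Int)) (x y t i : Int) (s : GLSt) :
    (updDR board x y t i s).urS = s.urS := by
  simp only [updDR]; split_ifs <;> rfl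

@[simp] lemma updDR_uS (board : List (List Int)) (x y t i : Int) (s : GLSt) :
    (updDR board x y t i s).uS = s.uS := by
  simp only [updDR]; split_ifs <;> rfl

@[simp] lemma updDR_ulS (board : List (List Int)) (x y t i : Int) (s : GLSt) :
    (updDR board x y t i s).ulS = s.ulS := by
  simp only [updDR]; split_ifs <;> rfl

@[simp] lemma updDR_l (board : List (List Int)) (x y t i : Int) (s : GLSt) :
    (updDR board x y t i s).l = s.l := by
  simp only [updDR]; split_ifs <;> rfl

@[simp] lemma updDR_dl (board : List (List Int)) (x y t i : Int) (s : GLSt) :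
    (updDR board x y t i s).dl = s.dl := by
  simp only [updDR]; split_ifs <;> rfl

@[simp] lemma updDR_d (board : List (List Int)) (x y t i : Int) (s : GLSt) :
    (updDR board x y t i s).d = s.d := by
  simp only [updDR]; split_ifs <;> rfl

@[simp] lemma updDR_r (board : List (List Int)) (x y t i : Int) (s : GLSt) :
    (updDR board x y t i s).r = s.r := by
  simp only [updDR]; split_ifs <;> rfl

@[simp] lemma updDR_ur (board : List (List Int)) (x y t i : Int) (s : GLSt) :
    (updDR board x y t i s).ur = s.ur := by
  simp only [updDR]; split_ifs <;> rfl

@[simp] lemma updDR_u (board : List (List Int)) (x y t i : Int) (s : GLSt) :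
    (updDR board x y t i s).u = s.u := by
  simp only [updDR]; split_ifs <;> rfl

@[simp] lemma updDR_ul (board : List (List Int)) (x y t i : Int) (s : GLSt) :
    (updDR board x y t i s).ul = s.ul := by
  simp only [updDR]; split_ifs <;> rfl

lemma glStep_l (board : List (List Int)) (x y t i : Int) (s : GLSt) :
    ((glStep board x y t s i).lS, (glStep board x y t s i).l)
      = stepL (decide (x - i ≥ 0)) (decide (pvCell board y (x - i) = t)) (s.lS, s.l) := by
  simp only [glStep, updUL_lS, updUL_l, updU_lS, updU_l, updUR_lS, updUR_l, updR_lS, updR_l, updDL_lS, updDL_l, updD_lS, updD_l, updDR_lS, updDR_l, updL, stepL,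
    apply_ite GLSt.lS, apply_ite GLSt.l]
  split_ifs <;> rfl

lemma glStep_r (board : List (List Int)) (x y t i : Int) (s : GLSt) :
    ((glStep board x y t s i).rS, (glStep board x y t s i).r)
      = stepL (decide (x + i < 19)) (decide (pvCell board y (x + i) = t)) (s.rS, s.r) := by
  simp only [glStep, updUL_rS, updUL_r, updU_rS, updU_r, updUR_rS, updUR_r, updL_rS, updL_r, updDL_rS, updDL_r, updD_rS, updD_r, updDR_rS, updDR_r, updR, stepL,
    apply_ite GLSt.rS, apply_ite GLSt.r]
  split_ifs <;> rfl

lemma glStep_u (board : List (List Int)) (x y t i : Int) (s : GLSt) :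
    ((glStep board x y t s i).uS, (glStep board x y t s i).u)
      = stepU (decide (y - i ≥ 0)) (decide (pvCell board (y - i) x = t)) (s.uS, s.u) := by
  simp only [glStep, updUL_uS, updUL_u, updUR_uS, updUR_u, updL_uS, updL_u, updR_uS, updR_u, updDL_uS, updDL_u, updD_uS, updD_u, updDR_uS, updDR_u, updU, stepU,
    apply_ite GLSt.uS, apply_ite GLSt.u]
  split_ifs <;> rfl

lemma glStep_d (board : List (List Int)) (x y t i : Int) (s : GLSt) :
    ((glStep board x y t s i).dS, (glStep board x y t s i).d)
      = stepU (decide (y + i < 19)) (decide (pvCell board (y + i) x = t)) (s.dS, s.d) := by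
  simp only [glStep, updUL_dS, updUL_d, updU_dS, updU_d, updUR_dS, updUR_d, updL_dS, updL_d, updR_dS, updR_d, updDL_dS, updDL_d, updDR_dS, updDR_d, updD, stepU,
    apply_ite GLSt.dS, apply_ite GLSt.d]
  split_ifs <;> rfl

lemma glStep_ul (board : List (List Int)) (x y t i : Int) (s : GLSt) :
    ((glStep board x y t s i).ulS, (glStep board x y t s i).ul)
      = stepD (decide (y - i ≥ 0)) (decide (x - i ≥ 0)) (decide (pvCell board (y - i) (x - i) = t)) (s.ulS, s.ul) := by
  simp only [glStep, updU_ulS, updU_ul, updUR_ulS, updUR_ul, updL_ulS, updL_ul, updR_ulS, updR_ul, updDL_ulS, updDL_ul, updD_ulS, updD_ul, updDR_ulS, updDR_ul, updUL, stepD,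
    apply_ite GLSt.ulS, apply_ite GLSt.ul]
  split_ifs <;> rfl

lemma glStep_ur (board : List (List Int)) (x y t i : Int) (s : GLSt) :
    ((glStep board x y t s i).urS, (glStep board x y t s i).ur)
      = stepD (decide (y - i ≥ 0)) (decide (x + i < 19)) (decide (pvCell board (y - i) (x + i) = t)) (s.urS, s.ur) := by
  simp only [glStep, updUL_urS, updUL_ur, updU_urS, updU_ur, updL_urS, updL_ur, updR_urS, updR_ur, updDL_urS, updDL_ur, updD_urS, updD_ur, updDR_urS, updDR_ur, updUR, stepD,
    apply_ite GLSt.urS, apply_ite GLSt.ur]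
  split_ifs <;> rfl

lemma glStep_dl (board : List (List Int)) (x y t i : Int) (s : GLSt) :
    ((glStep board x y t s i).dlS, (glStep board x y t s i).dl)
      = stepD (decide (y + i < 19)) (decide (x - i ≥ 0)) (decide (pvCell board (y + i) (x - i) = t)) (s.dlS, s.dl) := by
  simp only [glStep, updUL_dlS, updUL_dl, updU_dlS, updU_dl, updUR_dlS, updUR_dl, updL_dlS, updL_dl, updR_dlS, updR_dl, updD_dlS, updD_dl, updDR_dlS, updDR_dl, updDL, stepD,
    apply_ite GLSt.dlS, apply_ite GLSt.dl]
  split_ifs <;> rfl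

lemma glStep_dr (board : List (List Int)) (x y t i : Int) (s : GLSt) :
    ((glStep board x y t s i).drS, (glStep board x y t s i).dr)
      = stepD (decide (y + i < 19)) (decide (x + i < 19)) (decide (pvCell board (y + i) (x + i) = t)) (s.drS, s.dr) := by
  simp only [glStep, updUL_drS, updUL_dr, updU_drS, updU_dr, updUR_drS, updUR_dr, updL_drS, updL_dr, updR_drS, updR_dr, updDL_drS, updDL_dr, updD_drS, updD_dr, updDR, stepD,
    apply_ite GLSt.drS, apply_ite GLSt.dr]
  split_ifs <;> rfl

lemma fold_l (board : List (List Int)) (x y t : Int) :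
    ∀ (L : List Int) (s : GLSt),
      ((L.foldl (glStep board x y t) s).lS, (L.foldl (glStep board x y t) s).l)
        = L.foldl (fun p i => stepL (decide (x - i ≥ 0)) (decide (pvCell board y (x - i) = t)) p) (s.lS, s.l)
  | [], _ => rfl
  | i :: L, s => by
      rw [List.foldl_cons, List.foldl_cons, fold_l board x y t L (glStep board x y t s i),
        glStep_l]

lemma cnt_l (board : List (List Int)) (x y t : Int) (L : List Int) (s : GLSt) :
    (L.foldl (glStep board x y t) s).l
      = (L.foldl (fun p i => stepL (decide (x - i ≥ 0)) (decide (pvCell board y (x - i) = t)) p) (s.lS, s.l)).2 :=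
  congrArg Prod.snd (fold_l board x y t L s)

lemma fold_r (board : List (List Int)) (x y t : Int) :
    ∀ (L : List Int) (s : GLSt),
      ((L.foldl (glStep board x y t) s).rS, (L.foldl (glStep board x y t) s).r)
        = L.foldl (fun p i => stepL (decide (x + i < 19)) (decide (pvCell board y (x + i) = t)) p) (s.rS, s.r)
  | [], _ => rfl
  | i :: L, s => by
      rw [List.foldl_cons, List.foldl_cons, fold_r board x y t L (glStep board x y t s i),
        glStep_r]

lemma cnt_r (board : List (List Int)) (x y t : Int) (L : List Int) (s : GLSt) :
    (L.foldl (glStep board x y t) s).r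
      = (L.foldl (fun p i => stepL (decide (x + i < 19)) (decide (pvCell board y (x + i) = t)) p) (s.rS, s.r)).2 :=
  congrArg Prod.snd (fold_r board x y t L s)

lemma fold_u (board : List (List Int)) (x y t : Int) :
    ∀ (L : List Int) (s : GLSt),
      ((L.foldl (glStep board x y t) s).uS, (L.foldl (glStep board x y t) s).u)
        = L.foldl (fun p i => stepU (decide (y - i ≥ 0)) (decide (pvCell board (y - i) x = t)) p) (s.uS, s.u)
  | [], _ => rfl
  | i :: L, s => by
      rw [List.foldl_cons, List.foldl_cons, fold_u board x y t L (glStep board x y t s i),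
        glStep_u]

lemma cnt_u (board : List (List Int)) (x y t : Int) (L : List Int) (s : GLSt) :
    (L.foldl (glStep board x y t) s).u
      = (L.foldl (fun p i => stepU (decide (y - i ≥ 0)) (decide (pvCell board (y - i) x = t)) p) (s.uS, s.u)).2 :=
  congrArg Prod.snd (fold_u board x y t L s)

lemma fold_d (board : List (List Int)) (x y t : Int) :
    ∀ (L : List Int) (s : GLSt),
      ((L.foldl (glStep board x y t) s).dS, (L.foldl (glStep board x y t) s).d)
        = L.foldl (fun p i => stepU (decide (y + i < 19)) (decide (pvCell board (y + i) x = t)) p) (s.dS, s.d)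
  | [], _ => rfl
  | i :: L, s => by
      rw [List.foldl_cons, List.foldl_cons, fold_d board x y t L (glStep board x y t s i),
        glStep_d]

lemma cnt_d (board : List (List Int)) (x y t : Int) (L : List Int) (s : GLSt) :
    (L.foldl (glStep board x y t) s).d
      = (L.foldl (fun p i => stepU (decide (y + i < 19)) (decide (pvCell board (y + i) x = t)) p) (s.dS, s.d)).2 :=
  congrArg Prod.snd (fold_d board x y t L s)

lemma fold_ul (board : List (List Int)) (x y t : Int) :
    ∀ (L : List Int) (s : GLSt),
      ((L.foldl (glStep board x y t) s).ulS, (L.foldl (glStep board x y t) s).ul)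
        = L.foldl (fun p i => stepD (decide (y - i ≥ 0)) (decide (x - i ≥ 0)) (decide (pvCell board (y - i) (x - i) = t)) p) (s.ulS, s.ul)
  | [], _ => rfl
  | i :: L, s => by
      rw [List.foldl_cons, List.foldl_cons, fold_ul board x y t L (glStep board x y t s i),
        glStep_ul]

lemma cnt_ul (board : List (List Int)) (x y t : Int) (L : List Int) (s : GLSt) :
    (L.foldl (glStep board x y t) s).ul
      = (L.foldl (fun p i => stepD (decide (y - i ≥ 0)) (decide (x - i ≥ 0)) (decide (pvCell board (y - i) (x - i) = t)) p) (s.ulS, s.ul)).2 :=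
  congrArg Prod.snd (fold_ul board x y t L s)

lemma fold_ur (board : List (List Int)) (x y t : Int) :
    ∀ (L : List Int) (s : GLSt),
      ((L.foldl (glStep board x y t) s).urS, (L.foldl (glStep board x y t) s).ur)
        = L.foldl (fun p i => stepD (decide (y - i ≥ 0)) (decide (x + i < 19)) (decide (pvCell board (y - i) (x + i) = t)) p) (s.urS, s.ur)
  | [], _ => rfl
  | i :: L, s => by
      rw [List.foldl_cons, List.foldl_cons, fold_ur board x y t L (glStep board x y t s i),
        glStep_ur]

lemma cnt_ur (board : List (List Int)) (x y t : Int) (L : List Int) (s : GLSt) :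
    (L.foldl (glStep board x y t) s).ur
      = (L.foldl (fun p i => stepD (decide (y - i ≥ 0)) (decide (x + i < 19)) (decide (pvCell board (y - i) (x + i) = t)) p) (s.urS, s.ur)).2 :=
  congrArg Prod.snd (fold_ur board x y t L s)

lemma fold_dl (board : List (List Int)) (x y t : Int) :
    ∀ (L : List Int) (s : GLSt),
      ((L.foldl (glStep board x y t) s).dlS, (L.foldl (glStep board x y t) s).dl)
        = L.foldl (fun p i => stepD (decide (y + i < 19)) (decide (x - i ≥ 0)) (decide (pvCell board (y + i) (x - i) = t)) p) (s.dlS, s.dl)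
  | [], _ => rfl
  | i :: L, s => by
      rw [List.foldl_cons, List.foldl_cons, fold_dl board x y t L (glStep board x y t s i),
        glStep_dl]

lemma cnt_dl (board : List (List Int)) (x y t : Int) (L : List Int) (s : GLSt) :
    (L.foldl (glStep board x y t) s).dl
      = (L.foldl (fun p i => stepD (decide (y + i < 19)) (decide (x - i ≥ 0)) (decide (pvCell board (y + i) (x - i) = t)) p) (s.dlS, s.dl)).2 :=
  congrArg Prod.snd (fold_dl board x y t L s)

lemma fold_dr (board : List (List Int)) (x y t : Int) :
    ∀ (L : List Int) (s : GLSt),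
      ((L.foldl (glStep board x y t) s).drS, (L.foldl (glStep board x y t) s).dr)
        = L.foldl (fun p i => stepD (decide (y + i < 19)) (decide (x + i < 19)) (decide (pvCell board (y + i) (x + i) = t)) p) (s.drS, s.dr)
  | [], _ => rfl
  | i :: L, s => by
      rw [List.foldl_cons, List.foldl_cons, fold_dr board x y t L (glStep board x y t s i),
        glStep_dr]

lemma cnt_dr (board : List (List Int)) (x y t : Int) (L : List Int) (s : GLSt) :
    (L.foldl (glStep board x y t) s).dr
      = (L.foldl (fun p i => stepD (decide (y + i < 19)) (decide (x + i < 19)) (decide (pvCell board (y + i) (x + i) = t)) p) (s.drS, s.dr)).2 :=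
  congrArg Prod.snd (fold_dr board x y t L s)

lemma okB_l (board : List (List Int)) (x y t i : Int) (hi : 1 ≤ i) (hi4 : i ≤ 4) :
    (decide (x - i ≥ 0) && decide (pvCell board y (x - i) = t)) = (decide (i ≤ min 4 x) && decide (pvCell board (y + 0 * i) (x + -1 * i) = t)) := by
  have e1 : x + -1 * i = x - i := by ring
  have e2 : y + 0 * i = y := by ring
  rw [e1, e2]
  congr 1
  exact decide_eq_decide.mpr (by omega)

lemma okB_r (board : List (List Int)) (x y t i : Int) (hi : 1 ≤ i) (hi4 : i ≤ 4) :
    (decide (x + i < 19) && decide (pvCell board y (x + i) = t)) = (decide (i ≤ min 4 (18 - x)) && decide (pvCell board (y + 0 * i) (x + 1 * i) = t)) := by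
  have e1 : x + 1 * i = x + i := by ring
  have e2 : y + 0 * i = y := by ring
  rw [e1, e2]
  congr 1
  exact decide_eq_decide.mpr (by omega)

lemma okB_u (board : List (List Int)) (x y t i : Int) (hi : 1 ≤ i) (hi4 : i ≤ 4) :
    (decide (y - i ≥ 0) && decide (pvCell board (y - i) x = t)) = (decide (i ≤ min 4 y) && decide (pvCell board (y + -1 * i) (x + 0 * i) = t)) := by
  have e1 : x + 0 * i = x := by ring
  have e2 : y + -1 * i = y - i := by ring
  rw [e1, e2]
  congr 1
  exact decide_eq_decide.mpr (by omega)

lemma okB_d (board : List (List Int)) (x y t i : Int) (hi : 1 ≤ i) (hi4 : i ≤ 4) :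
    (decide (y + i < 19) && decide (pvCell board (y + i) x = t)) = (decide (i ≤ min 4 (18 - y)) && decide (pvCell board (y + 1 * i) (x + 0 * i) = t)) := by
  have e1 : x + 0 * i = x := by ring
  have e2 : y + 1 * i = y + i := by ring
  rw [e1, e2]
  congr 1
  exact decide_eq_decide.mpr (by omega)

lemma okB_ul (board : List (List Int)) (x y t i : Int) (hi : 1 ≤ i) (hi4 : i ≤ 4) :
    (decide (y - i ≥ 0) && (decide (x - i ≥ 0) && decide (pvCell board (y - i) (x - i) = t))) = (decide (i ≤ min (min 4 x) y) && decide (pvCell board (y + -1 * i) (x + -1 * i) = t)) := by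
  have e1 : x + -1 * i = x - i := by ring
  have e2 : y + -1 * i = y - i := by ring
  rw [e1, e2]
  exact and_merge _ _ _ (by omega) _

lemma okB_ur (board : List (List Int)) (x y t i : Int) (hi : 1 ≤ i) (hi4 : i ≤ 4) :
    (decide (y - i ≥ 0) && (decide (x + i < 19) && decide (pvCell board (y - i) (x + i) = t))) = (decide (i ≤ min (min 4 (18 - x)) y) && decide (pvCell board (y + -1 * i) (x + 1 * i) = t)) := by
  have e1 : x + 1 * i = x + i := by ring
  have e2 : y + -1 * i = y - i := by ring
  rw [e1, e2]
  exact and_merge _ _ _ (by omega) _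

lemma okB_dl (board : List (List Int)) (x y t i : Int) (hi : 1 ≤ i) (hi4 : i ≤ 4) :
    (decide (y + i < 19) && (decide (x - i ≥ 0) && decide (pvCell board (y + i) (x - i) = t))) = (decide (i ≤ min (min 4 x) (18 - y)) && decide (pvCell board (y + 1 * i) (x + -1 * i) = t)) := by
  have e1 : x + -1 * i = x - i := by ring
  have e2 : y + 1 * i = y + i := by ring
  rw [e1, e2]
  exact and_merge _ _ _ (by omega) _

lemma okB_dr (board : List (List Int)) (x y t i : Int) (hi : 1 ≤ i) (hi4 : i ≤ 4) :
    (decide (y + i < 19) && (decide (x + i < 19) && decide (pvCell board (y + i) (x + i) = t))) = (decide (i ≤ min (min 4 (18 - x)) (18 - y)) && decide (pvCell board (y + 1 * i) (x + 1 * i) = t)) := by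
  have e1 : x + 1 * i = x + i := by ring
  have e2 : y + 1 * i = y + i := by ring
  rw [e1, e2]
  exact and_merge _ _ _ (by omega) _


lemma dir_l (board : List (List Int)) (x y t : Int) :
    ((PySem.List.pyRange 1 5 1).foldl (glStep board x y t) glInit).l
      = glWalk board x y t (-1) 0 (PySem.List.pyRange 1 (glAllow x y (-1) 0 + 1) 1) := by
  have hpair : (glInit.lS, glInit.l) = ((true : Bool), (0 : Int)) := rfl
  have hA : glAllow x y (-1) 0 = min 4 x := by norm_num [glAllow]
  rw [hrange, cnt_l board x y t [1, 2, 3, 4] glInit, hpair]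
  simp only [List.foldl_cons, List.foldl_nil]
  rw [shape1, hA, walkB_chain board x y t (-1) 0 (min 4 x) (by omega),
    okB_l board x y t 1 (by omega) (by omega),
    okB_l board x y t 2 (by omega) (by omega),
    okB_l board x y t 3 (by omega) (by omega),
    okB_l board x y t 4 (by omega) (by omega)]

lemma dir_r (board : List (List Int)) (x y t : Int) :
    ((PySem.List.pyRange 1 5 1).foldl (glStep board x y t) glInit).r
      = glWalk board x y t 1 0 (PySem.List.pyRange 1 (glAllow x y 1 0 + 1) 1) := by
  have hpair : (glInit.rS, glInit.r) = ((true : Bool), (0 : Int)) := rfl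
  have hA : glAllow x y 1 0 = min 4 (18 - x) := by norm_num [glAllow]
  rw [hrange, cnt_r board x y t [1, 2, 3, 4] glInit, hpair]
  simp only [List.foldl_cons, List.foldl_nil]
  rw [shape1, hA, walkB_chain board x y t 1 0 (min 4 (18 - x)) (by omega),
    okB_r board x y t 1 (by omega) (by omega),
    okB_r board x y t 2 (by omega) (by omega),
    okB_r board x y t 3 (by omega) (by omega),
    okB_r board x y t 4 (by omega) (by omega)]

lemma dir_u (board : List (List Int)) (x y t : Int) :
    ((PySem.List.pyRange 1 5 1).foldl (glStep board x y t) glInit).u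
      = glWalk board x y t 0 (-1) (PySem.List.pyRange 1 (glAllow x y 0 (-1) + 1) 1) := by
  have hpair : (glInit.uS, glInit.u) = ((true : Bool), (0 : Int)) := rfl
  have hA : glAllow x y 0 (-1) = min 4 y := by norm_num [glAllow]
  have h21 : (decide (y - 2 ≥ 0)) = true → (decide (y - 1 ≥ 0)) = true := by
    simp only [decide_eq_true_eq]; omega
  have h32 : (decide (y - 3 ≥ 0)) = true → (decide (y - 2 ≥ 0)) = true := by
    simp only [decide_eq_true_eq]; omega
  have h43 : (decide (y - 4 ≥ 0)) = true → (decide (y - 3 ≥ 0)) = true := by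
    simp only [decide_eq_true_eq]; omega
  rw [hrange, cnt_u board x y t [1, 2, 3, 4] glInit, hpair]
  simp only [List.foldl_cons, List.foldl_nil]
  rw [shape2 _ _ _ _ _ _ _ _ h21 h32 h43, hA, walkB_chain board x y t 0 (-1) (min 4 y) (by omega),
    okB_u board x y t 1 (by omega) (by omega),
    okB_u board x y t 2 (by omega) (by omega),
    okB_u board x y t 3 (by omega) (by omega),
    okB_u board x y t 4 (by omega) (by omega)]

lemma dir_d (board : List (List Int)) (x y t : Int) :
    ((PySem.List.pyRange 1 5 1).foldl (glStep board x y t) glInit).d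
      = glWalk board x y t 0 1 (PySem.List.pyRange 1 (glAllow x y 0 1 + 1) 1) := by
  have hpair : (glInit.dS, glInit.d) = ((true : Bool), (0 : Int)) := rfl
  have hA : glAllow x y 0 1 = min 4 (18 - y) := by norm_num [glAllow]
  have h21 : (decide (y + 2 < 19)) = true → (decide (y + 1 < 19)) = true := by
    simp only [decide_eq_true_eq]; omega
  have h32 : (decide (y + 3 < 19)) = true → (decide (y + 2 < 19)) = true := by
    simp only [decide_eq_true_eq]; omega
  have h43 : (decide (y + 4 < 19)) = true → (decide (y + 3 < 19)) = true := by
    simp only [decide_eq_true_eq]; omega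
  rw [hrange, cnt_d board x y t [1, 2, 3, 4] glInit, hpair]
  simp only [List.foldl_cons, List.foldl_nil]
  rw [shape2 _ _ _ _ _ _ _ _ h21 h32 h43, hA, walkB_chain board x y t 0 1 (min 4 (18 - y)) (by omega),
    okB_d board x y t 1 (by omega) (by omega),
    okB_d board x y t 2 (by omega) (by omega),
    okB_d board x y t 3 (by omega) (by omega),
    okB_d board x y t 4 (by omega) (by omega)]

lemma dir_ul (board : List (List Int)) (x y t : Int) :
    ((PySem.List.pyRange 1 5 1).foldl (glStep board x y t) glInit).ul
      = glWalk board x y t (-1) (-1) (PySem.List.pyRange 1 (glAllow x y (-1) (-1) + 1) 1) := by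
  have hpair : (glInit.ulS, glInit.ul) = ((true : Bool), (0 : Int)) := rfl
  have hA : glAllow x y (-1) (-1) = min (min 4 x) y := by norm_num [glAllow]
  have h21 : (decide (y - 2 ≥ 0)) = true → (decide (y - 1 ≥ 0)) = true := by
    simp only [decide_eq_true_eq]; omega
  have h32 : (decide (y - 3 ≥ 0)) = true → (decide (y - 2 ≥ 0)) = true := by
    simp only [decide_eq_true_eq]; omega
  have h43 : (decide (y - 4 ≥ 0)) = true → (decide (y - 3 ≥ 0)) = true := by
    simp only [decide_eq_true_eq]; omega
  rw [hrange, cnt_ul board x y t [1, 2, 3, 4] glInit, hpair]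
  simp only [List.foldl_cons, List.foldl_nil]
  rw [shape3 _ _ _ _ _ _ _ _ _ _ _ _ h21 h32 h43, hA, walkB_chain board x y t (-1) (-1) (min (min 4 x) y) (by omega),
    okB_ul board x y t 1 (by omega) (by omega),
    okB_ul board x y t 2 (by omega) (by omega),
    okB_ul board x y t 3 (by omega) (by omega),
    okB_ul board x y t 4 (by omega) (by omega)]

lemma dir_ur (board : List (List Int)) (x y t : Int) :
    ((PySem.List.pyRange 1 5 1).foldl (glStep board x y t) glInit).ur
      = glWalk board x y t 1 (-1) (PySem.List.pyRange 1 (glAllow x y 1 (-1) + 1) 1) := by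
  have hpair : (glInit.urS, glInit.ur) = ((true : Bool), (0 : Int)) := rfl
  have hA : glAllow x y 1 (-1) = min (min 4 (18 - x)) y := by norm_num [glAllow]
  have h21 : (decide (y - 2 ≥ 0)) = true → (decide (y - 1 ≥ 0)) = true := by
    simp only [decide_eq_true_eq]; omega
  have h32 : (decide (y - 3 ≥ 0)) = true → (decide (y - 2 ≥ 0)) = true := by
    simp only [decide_eq_true_eq]; omega
  have h43 : (decide (y - 4 ≥ 0)) = true → (decide (y - 3 ≥ 0)) = true := by
    simp only [decide_eq_true_eq]; omega
  rw [hrange, cnt_ur board x y t [1, 2, 3, 4] glInit, hpair]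
  simp only [List.foldl_cons, List.foldl_nil]
  rw [shape3 _ _ _ _ _ _ _ _ _ _ _ _ h21 h32 h43, hA, walkB_chain board x y t 1 (-1) (min (min 4 (18 - x)) y) (by omega),
    okB_ur board x y t 1 (by omega) (by omega),
    okB_ur board x y t 2 (by omega) (by omega),
    okB_ur board x y t 3 (by omega) (by omega),
    okB_ur board x y t 4 (by omega) (by omega)]

lemma dir_dl (board : List (List Int)) (x y t : Int) :
    ((PySem.List.pyRange 1 5 1).foldl (glStep board x y t) glInit).dl
      = glWalk board x y t (-1) 1 (PySem.List.pyRange 1 (glAllow x y (-1) 1 + 1) 1) := by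
  have hpair : (glInit.dlS, glInit.dl) = ((true : Bool), (0 : Int)) := rfl
  have hA : glAllow x y (-1) 1 = min (min 4 x) (18 - y) := by norm_num [glAllow]
  have h21 : (decide (y + 2 < 19)) = true → (decide (y + 1 < 19)) = true := by
    simp only [decide_eq_true_eq]; omega
  have h32 : (decide (y + 3 < 19)) = true → (decide (y + 2 < 19)) = true := by
    simp only [decide_eq_true_eq]; omega
  have h43 : (decide (y + 4 < 19)) = true → (decide (y + 3 < 19)) = true := by
    simp only [decide_eq_true_eq]; omega
  rw [hrange, cnt_dl board x y t [1, 2, 3, 4] glInit, hpair]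
  simp only [List.foldl_cons, List.foldl_nil]
  rw [shape3 _ _ _ _ _ _ _ _ _ _ _ _ h21 h32 h43, hA, walkB_chain board x y t (-1) 1 (min (min 4 x) (18 - y)) (by omega),
    okB_dl board x y t 1 (by omega) (by omega),
    okB_dl board x y t 2 (by omega) (by omega),
    okB_dl board x y t 3 (by omega) (by omega),
    okB_dl board x y t 4 (by omega) (by omega)]

lemma dir_dr (board : List (List Int)) (x y t : Int) :
    ((PySem.List.pyRange 1 5 1).foldl (glStep board x y t) glInit).dr
      = glWalk board x y t 1 1 (PySem.List.pyRange 1 (glAllow x y 1 1 + 1) 1) := by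
  have hpair : (glInit.drS, glInit.dr) = ((true : Bool), (0 : Int)) := rfl
  have hA : glAllow x y 1 1 = min (min 4 (18 - x)) (18 - y) := by norm_num [glAllow]
  have h21 : (decide (y + 2 < 19)) = true → (decide (y + 1 < 19)) = true := by
    simp only [decide_eq_true_eq]; omega
  have h32 : (decide (y + 3 < 19)) = true → (decide (y + 2 < 19)) = true := by
    simp only [decide_eq_true_eq]; omega
  have h43 : (decide (y + 4 < 19)) = true → (decide (y + 3 < 19)) = true := by
    simp only [decide_eq_true_eq]; omega
  rw [hrange, cnt_dr board x y t [1, 2, 3, 4] glInit, hpair]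
  simp only [List.foldl_cons, List.foldl_nil]
  rw [shape3 _ _ _ _ _ _ _ _ _ _ _ _ h21 h32 h43, hA, walkB_chain board x y t 1 1 (min (min 4 (18 - x)) (18 - y)) (by omega),
    okB_dr board x y t 1 (by omega) (by omega),
    okB_dr board x y t 2 (by omega) (by omega),
    okB_dr board x y t 3 (by omega) (by omega),
    okB_dr board x y t 4 (by omega) (by omega)]


-- ===== VERDICT (by name: the statement is the Claim_ definition above) =====
theorem get_lengths_spec : Claim_equal_get_lengths := by
  intro board x y _ _
  unfold Spec_get_lengths
  show get_lengths board x y = get_lengths_alt board x y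
  simp only [get_lengths, get_lengths_alt, Prod.mk.injEq]
  refine ⟨?_, ?_, ?_, ?_⟩
  · rw [dir_l board x y _, dir_r board x y _]
  · rw [dir_dl board x y _, dir_ur board x y _]
  · rw [dir_d board x y _, dir_u board x y _]
  · rw [dir_dr board x y _, dir_ul board x y _]
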